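-- pv_equiv track=rewrite | github.com/Gerard003-ecu/apu_filter | app/apu_processor.py | _filter_trailing_empty
-- ===== SOURCE A (Python) =====
-- from typing import Any, Callable, Dict, Generic, List, Optional, Set, Tuple, Type, TypeVar
--
-- def _filter_trailing_empty(tokens: List[str]) -> List[str]:
--     """Elimina campos vacíos al final de una lista de campos."""
--     if not tokens:
--         return []
--     last_non_empty_idx = -1
--     for i in range(len(tokens) - 1, -1, -1):
--         token = tokens[i]
--         if isinstance(token, str) and token.strip():
--             last_non_empty_idx = i
--             break
--     if last_non_empty_idx < 0:
--         return []
--     return tokens[: last_non_empty_idx + 1]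
-- ===== SOURCE B (Python) =====
-- def _filter_trailing_empty(tokens):
--     """Elimina campos vacios al final de una lista de campos."""
--     last = -1
--     for i, token in enumerate(tokens):
--         if isinstance(token, str) and token.strip():
--             last = i
--     return tokens[: last + 1]
-- ===== Notes on version B (the rewrite author's own statement) =====
-- stated objective: simpler
-- what changed: Replaces the backward scan with an early break (plus empty-list and negative-index special cases) by a single forward pass that keeps a running last-non-empty index and slices once at the end.
import Mathlib
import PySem

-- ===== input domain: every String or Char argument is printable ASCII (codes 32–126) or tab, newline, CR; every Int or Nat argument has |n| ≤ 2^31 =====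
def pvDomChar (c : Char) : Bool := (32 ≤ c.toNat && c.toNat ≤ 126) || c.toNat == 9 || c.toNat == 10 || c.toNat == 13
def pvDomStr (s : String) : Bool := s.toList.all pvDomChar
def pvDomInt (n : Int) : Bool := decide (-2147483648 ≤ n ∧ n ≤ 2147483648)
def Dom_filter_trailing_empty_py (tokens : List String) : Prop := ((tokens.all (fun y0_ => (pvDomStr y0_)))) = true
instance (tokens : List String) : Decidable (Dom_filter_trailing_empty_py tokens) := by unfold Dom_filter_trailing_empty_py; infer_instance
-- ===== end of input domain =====

-- B replaces A's backward early-break scan (with its two special cases) by one forward pass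
-- keeping a running last-non-empty index; objective: simpler.

-- ===== PORT A =====
-- A's backward loop with break: recursion over the index list range(len-1,-1,-1).
-- tokens[i] is always in range here, so pyGetD with default "" equals Python's tokens[i].
def filterTrailingA_loop (tokens : List String) : List Int → Int
  | [] => -1
  | i :: rest =>
    let token := PySem.List.pyGetD tokens i ""
    if PySem.Str.strip token ≠ "" then i else filterTrailingA_loop tokens rest

def filter_trailing_empty_py (tokens : List String) : List String :=
  if tokens = [] then []
  else
    let lastNonEmptyIdx :=
      filterTrailingA_loop tokens (PySem.List.pyRange ((tokens.length : Int) - 1) (-1) (-1))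
    if lastNonEmptyIdx < 0 then []
    else PySem.List.slice tokens none (some (lastNonEmptyIdx + 1))

-- ===== PORT B =====
def filter_trailing_empty_py_alt (tokens : List String) : List String :=
  let last := (PySem.List.enumerate tokens 0).foldl
    (fun acc p => if PySem.Str.strip p.2 ≠ "" then p.1 else acc) (-1 : Int)
  PySem.List.slice tokens none (some (last + 1))

-- ===== PRECONDITION & SPEC =====
def Spec_filter_trailing_empty_py (tokens : List String) (out : List String) : Prop := out = filter_trailing_empty_py_alt tokens
instance (tokens : List String) (out : List String) : Decidable (Spec_filter_trailing_empty_py tokens out) := by unfold Spec_filter_trailing_empty_py; infer_instance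

-- ===== CLAIM (what is proved, stated in full; the proofs are below) =====
def Claim_equal_filter_trailing_empty_py : Prop := ∀ (tokens : List String), Dom_filter_trailing_empty_py tokens → Spec_filter_trailing_empty_py tokens (filter_trailing_empty_py tokens)

-- ===== LEMMAS AND PROOFS =====

-- B's accumulator, named for the proofs.
def bLast (tokens : List String) : Int :=
  (PySem.List.enumerate tokens 0).foldl
    (fun acc p => if PySem.Str.strip p.2 ≠ "" then p.1 else acc) (-1 : Int)

-- A's result of the backward scan, named for the proofs.
def aLast (tokens : List String) : Int :=
  filterTrailingA_loop tokens (PySem.List.pyRange ((tokens.length : Int) - 1) (-1) (-1))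

theorem bLast_append (xs : List String) (x : String) :
    bLast (xs ++ [x]) =
      if PySem.Str.strip x ≠ "" then (xs.length : Int) else bLast xs := by
  unfold bLast
  rw [PySem.List.enumerate_append, List.foldl_append]
  simp

theorem bLast_bounds (xs : List String) : -1 ≤ bLast xs ∧ bLast xs < (xs.length : Int) + 1 := by
  induction xs using List.reverseRecOn with
  | nil => simp [bLast, PySem.List.enumerate]
  | append_singleton xs x ih =>
    rw [bLast_append]
    rcases ih with ⟨h1, h2⟩
    split
    · simp
    · simp only [List.length_append, List.length_cons, List.length_nil]
      push_cast
      omega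

theorem aLoop_append (xs : List String) (x : String) (r : List Int)
    (hr : ∀ i ∈ r, 0 ≤ i ∧ i < (xs.length : Int)) :
    filterTrailingA_loop (xs ++ [x]) r = filterTrailingA_loop xs r := by
  induction r with
  | nil => rfl
  | cons i rest ih =>
    have hi := hr i (by simp)
    have hget : PySem.List.pyGetD (xs ++ [x]) i "" = PySem.List.pyGetD xs i "" := by
      rw [PySem.List.pyGetD_eq_getElem (xs ++ [x]) "" hi.1 (by simp; omega),
        PySem.List.pyGetD_eq_getElem xs "" hi.1 (by omega)]
      exact List.getElem_append_left (by omega)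
    simp only [filterTrailingA_loop]
    rw [hget, ih (fun j hj => hr j (by simp [hj]))]

theorem aLast_append (xs : List String) (x : String) :
    aLast (xs ++ [x]) =
      if PySem.Str.strip x ≠ "" then (xs.length : Int) else aLast xs := by
  have hx : PySem.List.pyGetD (xs ++ [x]) ((xs.length : Int)) "" = x := by
    rw [PySem.List.pyGetD_eq_getElem (xs ++ [x]) "" (by omega) (by simp)]
    simp
  show filterTrailingA_loop (xs ++ [x])
      (PySem.List.pyRange (((xs ++ [x]).length : Int) - 1) (-1) (-1)) = _
  rw [show (((xs ++ [x]).length : Int) - 1) = (xs.length : Int) by simp,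
    PySem.List.pyRange_neg_one_cons (by omega)]
  simp only [filterTrailingA_loop]
  rw [hx]
  split
  · rfl
  · exact aLoop_append xs x _ (fun i hi => by
      have := (PySem.List.mem_pyRange_neg_one).1 hi
      omega)

theorem aLast_eq_bLast (xs : List String) : aLast xs = bLast xs := by
  induction xs using List.reverseRecOn with
  | nil => decide
  | append_singleton xs x ih =>
    rw [aLast_append, bLast_append, ih]

-- ===== VERDICT (by name: the statement is the Claim_ definition above) =====
theorem filter_trailing_empty_py_spec : Claim_equal_filter_trailing_empty_py := by
  unfold Claim_equal_filter_trailing_empty_py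
  intro tokens _
  show (if tokens = [] then []
      else if aLast tokens < 0 then []
      else PySem.List.slice tokens none (some (aLast tokens + 1))) =
    PySem.List.slice tokens none (some (bLast tokens + 1))
  rw [aLast_eq_bLast]
  have hb := bLast_bounds tokens
  split
  · subst tokens
    have h0 : bLast ([] : List String) = -1 := by
      simp [bLast, PySem.List.enumerate]
    rw [h0]
    norm_num
    rw [PySem.List.slice_to _ (by norm_num)]
    simp
  · split
    · rename_i hneg
      have h1 : bLast tokens = -1 := by omega
      rw [h1]
      norm_num
      rw [PySem.List.slice_to _ (by norm_num)]
      simp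
    · rfl
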